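-- pv_equiv track=rewrite | github.com/akashdeep3194/Scaler | d13/Count ways to make sum of odd and even indexed elements equal by removing an array element.py | solve
-- ===== SOURCE A (Python) =====
-- def solve(A):
--     ses = []
--     ts = s = 0
--     ans = 0
--
--     for i in range(len(A)-1,-1,-1):
--
--         if i%2 == 0:
--             s += A[i]
--
--         ses.append(s)
--         ts += A[i]
--     ses = ses[::-1]
--     pos =  0
--
--     for i in range(len(A)):
--
--         if i%2 == 0:
--             os = pos + ses[i] - A[i]
--             es = ts - os - A[i]
--
--         else:
--             pos += A[i]
--             os = pos + ses[i] - A[i]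
--             es = ts - os - A[i]
--
--         if os == es:
--             ans += 1
--
--     return ans
-- ===== SOURCE B (Python) =====
-- def solve(A):
--     te = to = 0
--     for i, x in enumerate(A):
--         if i % 2 == 0:
--             te += x
--         else:
--             to += x
--     pe = po = ans = 0
--     for i, x in enumerate(A):
--         if i % 2 == 0:
--             se = te - pe - x
--             so = to - po
--         else:
--             se = te - pe
--             so = to - po - x
--         if pe + so == po + se:
--             ans += 1
--         if i % 2 == 0:
--             pe += x
--         else:
--             po += x
--     return ans
-- ===== Notes on version B (the rewrite author's own statement) =====
-- stated objective: simpler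
-- what changed: B drops A's backward pass that builds and reverses a suffix-even-sum list; it computes the even/odd-indexed totals once and then does a single forward pass maintaining the four parity-partitioned prefix sums, comparing the two post-removal sums directly.
import Mathlib
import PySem

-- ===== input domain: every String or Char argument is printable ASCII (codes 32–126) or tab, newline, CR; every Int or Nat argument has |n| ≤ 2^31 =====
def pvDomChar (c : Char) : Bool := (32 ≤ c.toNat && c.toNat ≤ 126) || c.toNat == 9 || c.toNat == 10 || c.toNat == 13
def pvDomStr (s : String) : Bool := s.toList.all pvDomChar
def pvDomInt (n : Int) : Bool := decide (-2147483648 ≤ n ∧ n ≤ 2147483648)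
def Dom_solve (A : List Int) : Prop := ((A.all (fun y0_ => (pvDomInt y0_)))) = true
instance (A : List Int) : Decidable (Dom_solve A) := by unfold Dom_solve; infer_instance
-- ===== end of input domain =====

-- B replaces A's reversed suffix-sum array and parity-folded suffix trick by a single
-- forward pass over four parity-partitioned running sums (simpler decomposition, no extra list).

-- ===== PORT A =====
def stepA1 (A : List Int) (st : List Int × Int × Int) (i : Int) : List Int × Int × Int :=
  let s := if PySem.Int.mod i 2 = 0 then st.2.1 + PySem.List.pyGetD A i 0 else st.2.1
  (st.1 ++ [s], s, st.2.2 + PySem.List.pyGetD A i 0)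

def stepA2 (A ses : List Int) (ts : Int) (st : Int × Int) (i : Int) : Int × Int :=
  if PySem.Int.mod i 2 = 0 then
    let os := st.1 + PySem.List.pyGetD ses i 0 - PySem.List.pyGetD A i 0
    let es := ts - os - PySem.List.pyGetD A i 0
    (st.1, if os = es then st.2 + 1 else st.2)
  else
    let pos := st.1 + PySem.List.pyGetD A i 0
    let os := pos + PySem.List.pyGetD ses i 0 - PySem.List.pyGetD A i 0
    let es := ts - os - PySem.List.pyGetD A i 0
    (pos, if os = es then st.2 + 1 else st.2)

def solve (A : List Int) : Int :=
  let st := (PySem.List.pyRange ((A.length : Int) - 1) (-1) (-1)).foldl (stepA1 A) ([], 0, 0)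
  let ses := (PySem.List.slice? st.1 none none (-1)).getD []
  let ts := st.2.2
  ((PySem.List.pyRange 0 (A.length : Int) 1).foldl (stepA2 A ses ts) (0, 0)).2

-- ===== PORT B =====
def stepB1 (st : Int × Int) (ix : Int × Int) : Int × Int :=
  if PySem.Int.mod ix.1 2 = 0 then (st.1 + ix.2, st.2) else (st.1, st.2 + ix.2)

def stepB2 (te tod : Int) (st : Int × Int × Int) (ix : Int × Int) : Int × Int × Int :=
  let seso := if PySem.Int.mod ix.1 2 = 0
    then (te - st.1 - ix.2, tod - st.2.1)
    else (te - st.1, tod - st.2.1 - ix.2)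
  let ans := if st.1 + seso.2 = st.2.1 + seso.1 then st.2.2 + 1 else st.2.2
  if PySem.Int.mod ix.1 2 = 0 then (st.1 + ix.2, st.2.1, ans) else (st.1, st.2.1 + ix.2, ans)

def solve_alt (A : List Int) : Int :=
  let tp := (PySem.List.enumerate A 0).foldl stepB1 (0, 0)
  ((PySem.List.enumerate A 0).foldl (stepB2 tp.1 tp.2) (0, 0, 0)).2.2

-- ===== PRECONDITION & SPEC =====
def Spec_solve (A : List Int) (out : Int) : Prop := out = solve_alt A
instance (A : List Int) (out : Int) : Decidable (Spec_solve A out) := by unfold Spec_solve; infer_instance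

-- ===== CLAIM (what is proved, stated in full; the proofs are below) =====
def Claim_equal_solve : Prop := ∀ (A : List Int), Dom_solve A → Spec_solve A (solve A)

-- ===== LEMMAS AND PROOFS =====

-- (even-indexed sum, odd-indexed sum) of a list
def eo : List Int → Int × Int
  | [] => (0, 0)
  | x :: t => ((eo t).2 + x, (eo t).1)

-- the common per-index counting condition (B's test, at index i of A)
def condC (A : List Int) (i : Nat) : Bool :=
  if i % 2 = 0 then
    decide ((eo (A.take i)).1 + ((eo A).2 - (eo (A.take i)).2) =
      (eo (A.take i)).2 + ((eo A).1 - (eo (A.take i)).1 - A.getD i 0))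
  else
    decide ((eo (A.take i)).1 + ((eo A).2 - (eo (A.take i)).2 - A.getD i 0) =
      (eo (A.take i)).2 + ((eo A).1 - (eo (A.take i)).1))

theorem mod_two_cast (j : Nat) : PySem.Int.mod (j : Int) 2 = ((j % 2 : Nat) : Int) := by
  have h := PySem.Int.mod_natCast j 2
  exact_mod_cast h

theorem eo_append_singleton (l : List Int) (x : Int) :
    eo (l ++ [x]) = if l.length % 2 = 0 then ((eo l).1 + x, (eo l).2)
                    else ((eo l).1, (eo l).2 + x) := by
  induction l with
  | nil => simp [eo]
  | cons a t ih =>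
      simp only [List.cons_append, eo, ih, List.length_cons]
      rcases Nat.even_or_odd t.length with h | h
      · have h0 : t.length % 2 = 0 := Nat.even_iff.mp h
        have h1 : (t.length + 1) % 2 = 1 := by omega
        simp [h0, h1]
      · have h0 : t.length % 2 = 1 := Nat.odd_iff.mp h
        have h1 : (t.length + 1) % 2 = 0 := by omega
        simp [h0, h1]
        ring

theorem eo_sum (l : List Int) : (eo l).1 + (eo l).2 = l.sum := by
  induction l with
  | nil => simp [eo]
  | cons a t ih => simp [eo]; omega

theorem take_succ_getD (l : List Int) (i : Nat) (h : i < l.length) :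
    l.take (i + 1) = l.take i ++ [l.getD i 0] := by
  rw [List.take_add_one, List.getElem?_eq_getElem h, List.getD_eq_getElem l 0 h]
  rfl

theorem eo_take_succ (A : List Int) (i : Nat) (h : i < A.length) :
    eo (A.take (i + 1)) =
      if i % 2 = 0 then ((eo (A.take i)).1 + A.getD i 0, (eo (A.take i)).2)
      else ((eo (A.take i)).1, (eo (A.take i)).2 + A.getD i 0) := by
  rw [take_succ_getD A i h, eo_append_singleton]
  simp [List.length_take, Nat.min_eq_left (Nat.le_of_lt h)]

theorem drop_sum_cons (A : List Int) (i : Nat) (h : i < A.length) :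
    (A.drop i).sum = A.getD i 0 + (A.drop (i + 1)).sum := by
  conv_lhs => rw [List.drop_eq_getElem_cons h]
  rw [List.sum_cons, List.getD_eq_getElem A 0 h]

theorem reverse_map_range {α : Type} (f : Nat → α) (n : Nat) :
    ((List.range n).map (fun k => f (n - 1 - k))).reverse = (List.range n).map f := by
  apply List.ext_getElem
  · simp
  · intro i h1 h2
    simp only [List.length_map, List.length_range, List.length_reverse] at h1 h2
    rw [List.getElem_reverse]
    simp only [List.length_map, List.length_range]
    rw [List.getElem_map, List.getElem_map, List.getElem_range, List.getElem_range]
    congr 1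
    omega

-- A's first loop, closed form
theorem loopA1 (A : List Int) (m : Nat) (hm : m ≤ A.length) :
    ((List.range m).map (fun k : Nat => ((A.length : Int) - 1 - (k : Int)))).foldl (stepA1 A) ([], 0, 0) =
      ((List.range m).map (fun k => (eo A).1 - (eo (A.take (A.length - 1 - k))).1),
       (eo A).1 - (eo (A.take (A.length - m))).1,
       (A.drop (A.length - m)).sum) := by
  induction m with
  | zero => simp
  | succ m ih =>
      have hm' : m ≤ A.length := by omega
      have hj : A.length - 1 - m < A.length := by omega
      have hnm : A.length - m = (A.length - 1 - m) + 1 := by omega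
      have hnm1 : A.length - (m + 1) = A.length - 1 - m := by omega
      have hcast : (A.length : Int) - 1 - (m : Int) = ((A.length - 1 - m : Nat) : Int) := by
        omega
      rw [List.range_succ, List.map_append, List.map_append, List.foldl_append, ih hm']
      simp only [List.map_cons, List.map_nil, List.foldl_cons, List.foldl_nil, stepA1, hcast,
        PySem.List.pyGetD_natCast, hnm, hnm1, mod_two_cast (A.length - 1 - m)]
      rw [eo_take_succ A (A.length - 1 - m) hj, drop_sum_cons A (A.length - 1 - m) hj]
      rcases Nat.even_or_odd (A.length - 1 - m) with h | h
      · have h0 : (A.length - 1 - m) % 2 = 0 := Nat.even_iff.mp h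
        simp [h0, Prod.mk.injEq]
        try omega
      · have h0 : (A.length - 1 - m) % 2 = 1 := Nat.odd_iff.mp h
        simp [h0, Prod.mk.injEq]
        try omega

-- A's second loop, closed form
theorem loopA2 (A ses : List Int) (ts : Int)
    (hses : ses = (List.range A.length).map (fun i => (eo A).1 - (eo (A.take i)).1))
    (hts : ts = (eo A).1 + (eo A).2) (m : Nat) (hm : m ≤ A.length) :
    ((List.range m).map (fun k : Nat => (k : Int))).foldl (stepA2 A ses ts) (0, 0) =
      ((eo (A.take m)).2, (((List.range m).countP (condC A)) : Int)) := by
  induction m with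
  | zero => simp [eo]
  | succ m ih =>
      have hm' : m ≤ A.length := by omega
      have hmlt : m < A.length := by omega
      have hsesm : PySem.List.pyGetD ses (m : Int) 0 = (eo A).1 - (eo (A.take m)).1 := by
        rw [PySem.List.pyGetD_natCast, hses, PySem.List.getD_map_range _ _ _ _ hmlt]
      have hcast2 : (((List.range m).countP (condC A) + List.countP (condC A) [m] : Nat) : Int)
          = (((List.range m).countP (condC A) : Nat) : Int) + (if condC A m then 1 else 0) := by
        simp only [List.countP_cons, List.countP_nil, Nat.zero_add]
        split <;> push_cast <;> ring
      rw [List.range_succ, List.map_append, List.foldl_append, ih hm', List.countP_append, hcast2]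
      simp only [List.map_cons, List.map_nil, List.foldl_cons, List.foldl_nil, stepA2,
        PySem.List.pyGetD_natCast, hsesm, mod_two_cast m]
      rw [eo_take_succ A m hmlt]
      rcases Nat.even_or_odd m with h | h
      · have h0 : m % 2 = 0 := Nat.even_iff.mp h
        simp [h0, condC, decide_eq_true_eq, hts, Prod.mk.injEq]
        split_ifs <;> omega
      · have h0 : m % 2 = 1 := Nat.odd_iff.mp h
        simp [h0, condC, decide_eq_true_eq, hts, Prod.mk.injEq]
        split_ifs <;> omega

-- enumerate as an indexed map
theorem enumerate_eq_map_range (A : List Int) (k : Nat) :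
    PySem.List.enumerate A (k : Int) =
      (List.range A.length).map (fun j : Nat => (((k + j : Nat) : Int), A.getD j 0)) := by
  induction A generalizing k with
  | nil => simp [PySem.List.enumerate]
  | cons a t ih =>
      rw [PySem.List.enumerate_cons]
      have hk1 : ((k : Int) + 1) = ((k + 1 : Nat) : Int) := by push_cast; ring
      rw [hk1, ih (k + 1)]
      simp only [List.length_cons, List.range_succ_eq_map, List.map_cons, List.map_map]
      congr 1
      all_goals try simp [List.getD]
      all_goals intro a ha
      all_goals omega

-- B's first loop, closed form
theorem loopB1 (A : List Int) (m : Nat) (hm : m ≤ A.length) :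
    ((List.range m).map (fun j : Nat => ((j : Int), A.getD j 0))).foldl stepB1 (0, 0) =
      ((eo (A.take m)).1, (eo (A.take m)).2) := by
  induction m with
  | zero => simp [eo]
  | succ m ih =>
      have hm' : m ≤ A.length := by omega
      have hmlt : m < A.length := by omega
      rw [List.range_succ, List.map_append, List.foldl_append, ih hm']
      simp only [List.map_cons, List.map_nil, List.foldl_cons, List.foldl_nil, stepB1,
        mod_two_cast m]
      rw [eo_take_succ A m hmlt]
      rcases Nat.even_or_odd m with h | h
      · have h0 : m % 2 = 0 := Nat.even_iff.mp h
        simp [h0]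
      · have h0 : m % 2 = 1 := Nat.odd_iff.mp h
        simp [h0]

-- B's second loop, closed form
theorem loopB2 (A : List Int) (te tod : Int) (hte : te = (eo A).1) (hto : tod = (eo A).2)
    (m : Nat) (hm : m ≤ A.length) :
    ((List.range m).map (fun j : Nat => ((j : Int), A.getD j 0))).foldl (stepB2 te tod) (0, 0, 0) =
      ((eo (A.take m)).1, (eo (A.take m)).2, (((List.range m).countP (condC A)) : Int)) := by
  induction m with
  | zero => simp [eo]
  | succ m ih =>
      have hm' : m ≤ A.length := by omega
      have hmlt : m < A.length := by omega
      have hcast2 : (((List.range m).countP (condC A) + List.countP (condC A) [m] : Nat) : Int)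
          = (((List.range m).countP (condC A) : Nat) : Int) + (if condC A m then 1 else 0) := by
        simp only [List.countP_cons, List.countP_nil, Nat.zero_add]
        split <;> push_cast <;> ring
      rw [List.range_succ, List.map_append, List.foldl_append, ih hm', List.countP_append, hcast2]
      simp only [List.map_cons, List.map_nil, List.foldl_cons, List.foldl_nil, stepB2,
        mod_two_cast m]
      rw [eo_take_succ A m hmlt]
      rcases Nat.even_or_odd m with h | h
      · have h0 : m % 2 = 0 := Nat.even_iff.mp h
        simp [h0, condC, decide_eq_true_eq, hte, hto, Prod.mk.injEq]
        split_ifs <;> omega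
      · have h0 : m % 2 = 1 := Nat.odd_iff.mp h
        simp [h0, condC, decide_eq_true_eq, hte, hto, Prod.mk.injEq]
        split_ifs <;> omega

theorem solve_eq_count (A : List Int) :
    solve A = (((List.range A.length).countP (condC A)) : Int) := by
  unfold solve
  have h1 : PySem.List.pyRange ((A.length : Int) - 1) (-1) (-1) =
      (List.range A.length).map (fun k : Nat => ((A.length : Int) - 1 - (k : Int))) := by
    have harg : (((A.length : Int) - 1) - (-1)).toNat = A.length := by omega
    rw [PySem.List.pyRange_neg_one, harg]
  rw [h1, loopA1 A A.length (le_refl _)]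
  have h2 : PySem.List.pyRange 0 (A.length : Int) 1 =
      (List.range A.length).map (fun k : Nat => (k : Int)) := by
    rw [PySem.List.pyRange_zero_natCast]
  simp only [PySem.List.slice?_none_none_neg_one, Option.getD_some]
  have h3 : ((List.range A.length).map
        (fun k => (eo A).1 - (eo (A.take (A.length - 1 - k))).1)).reverse =
      (List.range A.length).map (fun i => (eo A).1 - (eo (A.take i)).1) :=
    reverse_map_range (fun i => (eo A).1 - (eo (A.take i)).1) A.length
  rw [h3, h2, loopA2 A _ _ rfl ?_ A.length (le_refl _)]
  have h4 : A.length - A.length = 0 := by omega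
  rw [h4]
  simp [eo_sum]

theorem solve_alt_eq_count (A : List Int) :
    solve_alt A = (((List.range A.length).countP (condC A)) : Int) := by
  unfold solve_alt
  have he : PySem.List.enumerate A 0 =
      (List.range A.length).map (fun j : Nat => ((j : Int), A.getD j 0)) := by
    have h := enumerate_eq_map_range A 0
    simpa using h
  rw [he, loopB1 A A.length (le_refl _), List.take_length]
  simp only [loopB2 A ((eo A).1) ((eo A).2) rfl rfl A.length (le_refl _), List.take_length]

-- ===== VERDICT (by name: the statement is the Claim_ definition above) =====
theorem solve_spec : Claim_equal_solve := by
  intro A _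
  unfold Spec_solve
  rw [solve_eq_count, solve_alt_eq_count]
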